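-- pv_equiv track=rewrite | github.com/sidhbk08/Call-Break | game/views.py | player_call
-- ===== SOURCE A (Python) =====
-- def player_call(carlist, trumpc):
-- 	dicti={1:[], 2:[], 3:[], 4:[]}
-- 	dicts=0
-- 	maxi=0
-- 	count=0.0
-- 	for acr in carlist:
-- 		dicti[acr//13+1].append(acr%13)
-- 	for j in range(1,5):
-- 		if trumpc==j:
-- 			for carz in dicti[j]:
-- 				if carz>9:
-- 					count+=1
-- 				elif carz>7:
-- 					count+=.5
-- 		else:
-- 			for carz in dicti[j]:
-- 				if carz>10:
-- 					count+=1
-- 				elif carz>8: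
-- 					count+=.25
-- 	return int(count)
-- ===== SOURCE B (Python) =====
-- def player_call(carlist, trumpc):
--     # Single pass, integer quarter-points instead of per-suit dict grouping + float accumulator.
--     quarters = 0
--     for acr in carlist:
--         rank = acr % 13
--         if acr // 13 + 1 == trumpc:
--             quarters += 4 if rank > 9 else (2 if rank > 7 else 0)
--         else:
--             quarters += 4 if rank > 10 else (1 if rank > 8 else 0)
--     return quarters // 4
-- ===== Notes on version B (the rewrite author's own statement) =====
-- stated objective: simpler
-- what changed: Replaces A's per-suit dict grouping plus a second per-suit loop with float increments by a single linear pass that accumulates integer quarter-points (4/2/0 for the trump suit, 4/1/0 otherwise) and returns quarters // 4, eliminating the intermediate dict and all float arithmetic.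
import Mathlib
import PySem

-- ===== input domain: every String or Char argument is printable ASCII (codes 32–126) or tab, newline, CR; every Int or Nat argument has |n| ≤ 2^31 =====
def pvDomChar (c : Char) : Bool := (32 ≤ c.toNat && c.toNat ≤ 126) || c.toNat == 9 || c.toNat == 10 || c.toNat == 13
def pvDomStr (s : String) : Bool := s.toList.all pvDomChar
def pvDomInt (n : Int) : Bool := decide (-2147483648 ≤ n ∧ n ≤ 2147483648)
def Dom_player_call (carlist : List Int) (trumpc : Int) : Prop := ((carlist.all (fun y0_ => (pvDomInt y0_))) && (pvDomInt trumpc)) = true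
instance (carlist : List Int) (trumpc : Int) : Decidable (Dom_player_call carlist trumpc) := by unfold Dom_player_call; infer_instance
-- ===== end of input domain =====

-- B replaces A's per-suit dict grouping + float accumulator by one linear pass adding
-- integer quarter-points and returning quarters // 4 (objective: simpler).

-- ===== PORT A =====
-- Python's float `count` only ever holds multiples of 1/4 bounded by the list length, which
-- binary floats represent exactly, so ℚ is an exact model; int(count) truncates toward zero,
-- and count ≥ 0 always, so it is ⌊count⌋.  `dicti[...].append` raises KeyError on a missing
-- key (Dict.modify would insert instead) — exactly those inputs are excluded by Pre_.
def player_call (carlist : List Int) (trumpc : Int) : Int :=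
  let dicti0 : PySem.Dict Int (List Int) :=
    ((((PySem.Dict.empty.insert 1 []).insert 2 []).insert 3 []).insert 4 [])
  let dicti := carlist.foldl
    (fun d acr => d.modify (PySem.Int.floordiv acr 13 + 1) []
      (fun l => l ++ [PySem.Int.mod acr 13])) dicti0
  let count : ℚ := (PySem.List.pyRange 1 5 1).foldl (fun count j =>
      if trumpc == j then
        (dicti.getD j []).foldl
          (fun count carz =>
            if carz > 9 then count + 1 else if carz > 7 then count + (1/2 : ℚ) else count) count
      else
        (dicti.getD j []).foldl
          (fun count carz =>
            if carz > 10 then count + 1 else if carz > 8 then count + (1/4 : ℚ) else count) count)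
    0
  ⌊count⌋

-- ===== PORT B =====
def player_call_alt (carlist : List Int) (trumpc : Int) : Int :=
  let quarters := carlist.foldl (fun q acr =>
    let rank := PySem.Int.mod acr 13
    if (PySem.Int.floordiv acr 13 + 1) == trumpc then
      q + (if rank > 9 then 4 else if rank > 7 then 2 else 0)
    else
      q + (if rank > 10 then 4 else if rank > 8 then 1 else 0)) 0
  PySem.Int.floordiv quarters 4

-- ===== PRECONDITION & SPEC =====
-- Pre_ excludes exactly the cards whose suit acr//13+1 falls outside the dict keys 1..4,
-- i.e. acr outside 0..51, on which A raises KeyError.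
def Pre_player_call (carlist : List Int) (trumpc : Int) : Prop :=
  ∀ acr ∈ carlist, 0 ≤ acr ∧ acr < 52
instance (carlist : List Int) (trumpc : Int) : Decidable (Pre_player_call carlist trumpc) := by
  unfold Pre_player_call; infer_instance
def pvWitness_player_call : List Int × Int := ([12, 25, 51, 0, 8], 2)

def Spec_player_call (carlist : List Int) (trumpc : Int) (out : Int) : Prop :=
  out = player_call_alt carlist trumpc
instance (carlist : List Int) (trumpc : Int) (out : Int) : Decidable (Spec_player_call carlist trumpc out) := by
  unfold Spec_player_call; infer_instance

-- ===== CLAIM (what is proved, stated in full; the proofs are below) =====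
def Claim_equal_player_call : Prop := ∀ (carlist : List Int) (trumpc : Int), Dom_player_call carlist trumpc → Pre_player_call carlist trumpc → Spec_player_call carlist trumpc (player_call carlist trumpc)

-- ===== LEMMAS AND PROOFS =====

def pvKey (a : Int) : Int := PySem.Int.floordiv a 13 + 1
def pvRank (a : Int) : Int := PySem.Int.mod a 13
lemma pv_group (cl : List Int) (j : Int) :
    (cl.foldl
      (fun d acr => d.modify (PySem.Int.floordiv acr 13 + 1) []
        (fun l => l ++ [PySem.Int.mod acr 13]))
      ((((PySem.Dict.empty.insert 1 []).insert 2 []).insert 3 ([] : List Int)).insert 4 [])).getD j []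
    = (cl.filter (fun a => pvKey a == j)).map pvRank := by
  have hm : cl.foldl
      (fun d acr => d.modify (PySem.Int.floordiv acr 13 + 1) []
        (fun l => l ++ [PySem.Int.mod acr 13]))
      ((((PySem.Dict.empty.insert 1 []).insert 2 []).insert 3 ([] : List Int)).insert 4 [])
      = (cl.map (fun a => (pvKey a, pvRank a))).foldl
        (fun d p => d.modify p.1 [] (fun l => l ++ [p.2]))
        ((((PySem.Dict.empty.insert 1 []).insert 2 []).insert 3 ([] : List Int)).insert 4 []) := by
    rw [List.foldl_map]; rfl
  rw [hm, PySem.Dict.getD_foldl_modify_append]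
  have h0 : ((((PySem.Dict.empty.insert 1 []).insert 2 []).insert 3 ([] : List Int)).insert 4 []).getD j [] = [] := by
    simp [PySem.Dict.getD_insert]
  rw [h0]
  simp [List.filter_map, List.map_map, Function.comp_def]
lemma pv_key_range (a : Int) (h : 0 ≤ a ∧ a < 52) : 1 ≤ pvKey a ∧ pvKey a ≤ 4 := by
  unfold pvKey
  have h1 : (0:Int) ≤ PySem.Int.floordiv a 13 := by
    rw [PySem.Int.le_floordiv_iff_mul_le (by norm_num)]; omega
  have h2 : PySem.Int.floordiv a 13 < 4 := by
    rw [PySem.Int.floordiv_lt_iff_lt_mul (by norm_num)]; omega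
  omega
def pvG (t a : Int) : Int :=
  if pvKey a == t then
    (if pvRank a > 9 then 4 else if pvRank a > 7 then 2 else 0)
  else
    (if pvRank a > 10 then 4 else if pvRank a > 8 then 1 else 0)
lemma pv_foldl_add_rat (l : List Int) (f : Int → ℚ) (a : ℚ) :
    l.foldl (fun c x => c + f x) a = a + (l.map f).sum := by
  induction l generalizing a with
  | nil => simp
  | cons x l ih => simp [List.foldl_cons, ih]; ring
lemma pv_inner_trump (L : List Int) (c : ℚ) :
    L.foldl (fun count carz =>
      if carz > 9 then count + 1 else if carz > 7 then count + (1/2 : ℚ) else count) c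
    = c + (L.map (fun r => if r > 9 then (1:ℚ) else if r > 7 then 1/2 else 0)).sum := by
  rw [← pv_foldl_add_rat]
  apply PySem.List.foldl_congr_mem
  intro acc x _; split_ifs <;> simp
lemma pv_inner_plain (L : List Int) (c : ℚ) :
    L.foldl (fun count carz =>
      if carz > 10 then count + 1 else if carz > 8 then count + (1/4 : ℚ) else count) c
    = c + (L.map (fun r => if r > 10 then (1:ℚ) else if r > 8 then 1/4 else 0)).sum := by
  rw [← pv_foldl_add_rat]
  apply PySem.List.foldl_congr_mem
  intro acc x _; split_ifs <;> simp
-- pointwise: A's per-card rational increment is B's quarter-points over 4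
lemma pv_pt_trump (r : Int) :
    (if r > 9 then (1:ℚ) else if r > 7 then 1/2 else 0)
    = (((if r > 9 then (4:Int) else if r > 7 then 2 else 0) : Int) : ℚ)/4 := by
  push_cast; split_ifs <;> norm_num
lemma pv_pt_plain (r : Int) :
    (if r > 10 then (1:ℚ) else if r > 8 then 1/4 else 0)
    = (((if r > 10 then (4:Int) else if r > 8 then 1 else 0) : Int) : ℚ)/4 := by
  push_cast; split_ifs <;> norm_num
-- per-group: branch value equals pvG/4
lemma pv_group_sum (cl : List Int) (t j : Int) :
    (((cl.filter (fun a => pvKey a == j)).map pvRank).map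
        (if t == j then (fun r => if r > 9 then (1:ℚ) else if r > 7 then 1/2 else 0)
         else (fun r => if r > 10 then (1:ℚ) else if r > 8 then 1/4 else 0))).sum
    = ((cl.filter (fun a => pvKey a == j)).map (fun a => (pvG t a : ℚ)/4)).sum := by
  rw [List.map_map]
  apply congrArg
  apply List.map_congr_left
  intro a ha
  have hk : pvKey a = j := by simpa using (List.mem_filter.mp ha).2
  by_cases ht : t = j
  · subst ht
    simp only [Function.comp_apply, beq_self_eq_true, if_true, pvG, hk]
    exact pv_pt_trump (pvRank a)
  · have ht1 : (t == j) = false := by simp [ht]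
    have ht2 : (pvKey a == t) = false := by rw [hk]; simp [Ne.symm ht]
    simp only [Function.comp_apply, ht1, if_false, Bool.false_eq_true, pvG, ht2]
    exact pv_pt_plain (pvRank a)
lemma pv_sum_div (cl : List Int) (t : Int) :
    (cl.map (fun a => (pvG t a : ℚ)/4)).sum = (((cl.map (pvG t)).sum : Int) : ℚ)/4 := by
  induction cl with
  | nil => simp
  | cons x l ih => simp [ih]; ring
lemma pv_step (b : Bool) (x : ℚ) (L : List Int) :
    (if b then
       L.foldl (fun count carz =>
         if carz > 9 then count + 1 else if carz > 7 then count + (1/2 : ℚ) else count) x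
     else
       L.foldl (fun count carz =>
         if carz > 10 then count + 1 else if carz > 8 then count + (1/4 : ℚ) else count) x)
    = x + (L.map (if b then (fun r => if r > 9 then (1:ℚ) else if r > 7 then 1/2 else 0)
                  else (fun r => if r > 10 then (1:ℚ) else if r > 8 then 1/4 else 0))).sum := by
  cases b
  · simp only [Bool.false_eq_true, if_false]; exact pv_inner_plain L x
  · simp only [if_true]; exact pv_inner_trump L x
lemma pv_partition (cl : List Int) (f : Int → ℚ)
    (h : ∀ a ∈ cl, 1 ≤ pvKey a ∧ pvKey a ≤ 4) :
    ((cl.filter (fun a => pvKey a == 1)).map f).sum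
      + ((cl.filter (fun a => pvKey a == 2)).map f).sum
      + ((cl.filter (fun a => pvKey a == 3)).map f).sum
      + ((cl.filter (fun a => pvKey a == 4)).map f).sum
    = (cl.map f).sum := by
  induction cl with
  | nil => simp
  | cons x l ih =>
    have hx := h x (List.mem_cons_self)
    have ihl := ih (fun a ha => h a (List.mem_cons_of_mem _ ha))
    have hk : pvKey x = 1 ∨ pvKey x = 2 ∨ pvKey x = 3 ∨ pvKey x = 4 := by omega
    rcases hk with hk | hk | hk | hk <;>
      simp only [List.filter_cons, List.map_cons, List.sum_cons, hk] <;>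
      norm_num <;> linarith [ihl]

lemma pvB_eq_sum (cl : List Int) (t : Int) :
    player_call_alt cl t = PySem.Int.floordiv ((cl.map (pvG t)).sum) 4 := by
  unfold player_call_alt
  have h : cl.foldl (fun q acr =>
      let rank := PySem.Int.mod acr 13
      if (PySem.Int.floordiv acr 13 + 1) == t then
        q + (if rank > 9 then 4 else if rank > 7 then 2 else 0)
      else
        q + (if rank > 10 then 4 else if rank > 8 then 1 else 0)) 0
      = cl.foldl (fun q acr => q + pvG t acr) 0 := by
    apply PySem.List.foldl_congr_mem
    intro acc x _
    simp only [pvG, pvKey, pvRank]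
    split_ifs <;> rfl
  rw [h, PySem.List.foldl_add]
  simp


-- ===== VERDICT (by name: the statement is the Claim_ definition above) =====
theorem player_call_spec : Claim_equal_player_call := by
  intro cl t _ hpre
  unfold Spec_player_call
  rw [pvB_eq_sum]
  unfold player_call
  have hR : PySem.List.pyRange 1 5 1 = [1,2,3,4] := by decide
  simp only [hR, List.foldl_cons, List.foldl_nil]
  rw [pv_group cl 1, pv_group cl 2, pv_group cl 3, pv_group cl 4]
  simp only [pv_step]
  rw [pv_group_sum cl t 1, pv_group_sum cl t 2, pv_group_sum cl t 3, pv_group_sum cl t 4]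
  rw [zero_add, add_assoc, add_assoc, ← add_assoc, ← add_assoc]
  rw [pv_partition cl _ (fun a ha => pv_key_range a (hpre a ha))]
  rw [pv_sum_div]
  have h1 : ⌊(((cl.map (pvG t)).sum : Int) : ℚ)/4⌋ = (cl.map (pvG t)).sum / 4 := by
    exact_mod_cast Rat.floor_intCast_div_natCast ((cl.map (pvG t)).sum) 4
  rw [h1, PySem.Int.floordiv_eq_ediv_of_pos (by norm_num)]
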